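-- pv_equiv track=rewrite | github.com/FireSpirit171/TMO | tinkoff/main.py | compute_powers
-- ===== SOURCE A (Python) =====
-- MOD = 998244353
--
-- def compute_powers(n, k, nums):
--     from collections import defaultdict
--
--     sum_pairs = defaultdict(int)
--     for i in range(n):
--         for j in range(i + 1, n):
--             pair_sum = nums[i] + nums[j]
--             sum_pairs[pair_sum] += 1
--
--     output = []
--     for r in range(1, k + 1):
--         total_sum = 0
--         for pair_sum, count in sum_pairs.items():
--             total_sum += pow(pair_sum, r, MOD) * count
--             total_sum %= MOD
--         output.append(total_sum)
--
--     return output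
-- ===== SOURCE B (Python) =====
-- MOD = 998244353
--
-- def compute_powers(n, k, nums):
--     xs = nums[:n] if n > 0 else []
--     cnt = {}
--     for x in xs:
--         cnt[x] = cnt.get(x, 0) + 1
--     vals = list(cnt)
--     pc = {}
--     for i in range(len(vals)):
--         u = vals[i]
--         if cnt[u] > 1:
--             pc[2 * u] = pc.get(2 * u, 0) + cnt[u] * (cnt[u] - 1) // 2
--         for v in vals[i + 1:]:
--             pc[u + v] = pc.get(u + v, 0) + cnt[u] * cnt[v]
--     svals = [s for s in pc]
--     cvals = [pc[s] for s in pc]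
--     powers = [1] * len(svals)
--     out = []
--     for _ in range(max(k, 0)):
--         powers = [pw * s % MOD for pw, s in zip(powers, svals)]
--         total = 0
--         for pw, c in zip(powers, cvals):
--             total += pw * c
--         out.append(total % MOD)
--     return out
-- ===== Notes on version B (the rewrite author's own statement) =====
-- stated objective: faster
-- what changed: B first counts distinct values, builds the pair-sum multiset by convolving value counts over distinct values only (with C(c,2) for equal pairs) instead of enumerating all O(n^2) index pairs, and computes the k power totals with incremental running products instead of a modular exponentiation per (pair sum, power).
import Mathlib
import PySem

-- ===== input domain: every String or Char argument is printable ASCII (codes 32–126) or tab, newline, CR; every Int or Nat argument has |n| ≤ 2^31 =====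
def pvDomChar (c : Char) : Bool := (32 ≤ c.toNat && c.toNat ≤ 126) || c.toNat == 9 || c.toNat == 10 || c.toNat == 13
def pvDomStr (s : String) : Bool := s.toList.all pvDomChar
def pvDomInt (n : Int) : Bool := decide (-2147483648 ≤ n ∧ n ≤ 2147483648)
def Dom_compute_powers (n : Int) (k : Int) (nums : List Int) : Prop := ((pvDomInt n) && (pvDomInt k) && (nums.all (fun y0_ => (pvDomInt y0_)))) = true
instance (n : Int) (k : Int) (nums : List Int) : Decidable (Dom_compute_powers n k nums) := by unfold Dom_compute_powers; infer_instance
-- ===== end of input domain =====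

-- B counts distinct values first and builds the pair-sum multiset by convolving value
-- counts over distinct values only, then computes all k power totals with incremental
-- running products instead of per-power modular exponentiation; objective: faster.

-- ===== PORT A =====
def compute_powers (n : Int) (k : Int) (nums : List Int) : List Int :=
  let sum_pairs : PySem.Dict Int Int :=
    (PySem.List.pyRange 0 n 1).foldl (fun d i =>
      (PySem.List.pyRange (i + 1) n 1).foldl (fun d j =>
        d.modify (PySem.List.pyGetD nums i 0 + PySem.List.pyGetD nums j 0) 0 (· + 1)) d)
      PySem.Dict.empty
  (PySem.List.pyRange 1 (k + 1) 1).foldl (fun output r =>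
    output ++ [sum_pairs.items.foldl
      (fun total_sum pc => (total_sum + PySem.Int.powMod pc.1 r.toNat 998244353 * pc.2) % 998244353) 0]) []

-- ===== PORT B =====
def compute_powers_alt (n : Int) (k : Int) (nums : List Int) : List Int :=
  let xs : List Int := if 0 < n then PySem.List.slice nums none (some n) else []
  let cnt : PySem.Dict Int Int := xs.foldl (fun d x => d.insert x (d.getD x 0 + 1)) PySem.Dict.empty
  let vals : List Int := cnt.keys
  let pc : PySem.Dict Int Int :=
    (PySem.List.pyRange 0 (vals.length : Int) 1).foldl (fun d i =>
      (PySem.List.slice vals (some (i + 1)) none).foldl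
        (fun d v => d.insert (PySem.List.pyGetD vals i 0 + v)
          (d.getD (PySem.List.pyGetD vals i 0 + v) 0
            + cnt.getD (PySem.List.pyGetD vals i 0) 0 * cnt.getD v 0))
        (if 1 < cnt.getD (PySem.List.pyGetD vals i 0) 0 then
          d.insert (2 * PySem.List.pyGetD vals i 0)
            (d.getD (2 * PySem.List.pyGetD vals i 0) 0
              + PySem.Int.floordiv (cnt.getD (PySem.List.pyGetD vals i 0) 0
                  * (cnt.getD (PySem.List.pyGetD vals i 0) 0 - 1)) 2)
         else d))
      PySem.Dict.empty
  let svals : List Int := pc.keys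
  let cvals : List Int := svals.map (fun s => pc.getD s 0)
  let res := (PySem.List.pyRange 0 (max k 0) 1).foldl
    (fun (st : List Int × List Int) _ =>
      let powers := (st.1.zip svals).map (fun ps => ps.1 * ps.2 % 998244353)
      (powers, st.2 ++ [(powers.zip cvals).foldl (fun t q => t + q.1 * q.2) 0 % 998244353]))
    (List.replicate svals.length 1, [])
  res.2

-- ===== PRECONDITION & SPEC =====
-- Pre_ excludes exactly the inputs where A raises IndexError: n ≥ 2 with fewer than n numbers.
def Pre_compute_powers (n : Int) (k : Int) (nums : List Int) : Prop :=
  2 ≤ n → n ≤ (nums.length : Int)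
instance (n : Int) (k : Int) (nums : List Int) : Decidable (Pre_compute_powers n k nums) := by
  unfold Pre_compute_powers; infer_instance
def pvWitness_compute_powers : Int × Int × List Int := (3, 2, [1, 2, 3])

def Spec_compute_powers (n : Int) (k : Int) (nums : List Int) (out : List Int) : Prop := out = compute_powers_alt n k nums
instance (n : Int) (k : Int) (nums : List Int) (out : List Int) : Decidable (Spec_compute_powers n k nums out) := by unfold Spec_compute_powers; infer_instance

-- ===== CLAIM (what is proved, stated in full; the proofs are below) =====
def Claim_equal_compute_powers : Prop := ∀ (n : Int) (k : Int) (nums : List Int), Dom_compute_powers n k nums → Pre_compute_powers n k nums → Spec_compute_powers n k nums (compute_powers n k nums)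

-- ===== LEMMAS AND PROOFS =====
-- helper defs
def pvPairs : List Int → List Int
  | [] => []
  | x :: t => t.map (fun y => x + y) ++ pvPairs t

def pvG (xs : List Int) (r : Nat) : Int := ((pvPairs xs).map (fun v => v ^ r)).sum

-- (2) pointwise ModEq sum
theorem pv_sum_modEq {α : Type} (m : Int) (f g : α → Int) (l : List α)
    (h : ∀ x ∈ l, f x ≡ g x [ZMOD m]) : (l.map f).sum ≡ (l.map g).sum [ZMOD m] := by
  induction l with
  | nil => rfl
  | cons a t ih =>
    simp only [List.map_cons, List.sum_cons]
    exact Int.ModEq.add (h a (by simp)) (ih (fun x hx => h x (List.mem_cons_of_mem _ hx)))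

-- (1) mod-accumulating foldl
theorem pv_foldl_mod {α : Type} (m : Int) (f : α → Int) (l : List α) (a : Int) :
    l.foldl (fun t x => (t + f x) % m) (a % m) = (a + (l.map f).sum) % m := by
  induction l generalizing a with
  | nil => simp
  | cons b t ih =>
    simp only [List.foldl_cons, List.map_cons, List.sum_cons]
    rw [Int.add_emod, Int.emod_emod_of_dvd _ dvd_rfl, ← Int.add_emod, ih]
    ring_nf

theorem pv_foldl_mod₀ {α : Type} (m : Int) (f : α → Int) (l : List α) :
    l.foldl (fun t x => (t + f x) % m) 0 = (l.map f).sum % m := by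
  have := pv_foldl_mod m f l 0
  simpa using this

-- (3) indicator sum
theorem pv_sum_indicator (f : Int → Int) (K : List Int) (x : Int)
    (hK : K.Nodup) (hx : x ∈ K) :
    (K.map (fun s => if s = x then f s else 0)).sum = f x := by
  induction K with
  | nil => cases hx
  | cons a t ih =>
    simp only [List.map_cons, List.sum_cons]
    rcases List.mem_cons.mp hx with h | h
    · have hz : ∀ s ∈ t, (if s = x then f s else 0) = 0 := by
        intro s hs
        apply if_neg
        intro e
        exact (List.nodup_cons.mp hK).1 (by rw [← h, ← e]; exact hs)
      rw [List.map_congr_left hz]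
      simp [h]
    · have hne : a ≠ x := fun e => (List.nodup_cons.mp hK).1 (e ▸ h)
      rw [if_neg hne, ih (List.nodup_cons.mp hK).2 h]
      simp

theorem pv_sum_count (f : Int → Int) (K L : List Int)
    (hK : K.Nodup) (hm : ∀ v ∈ L, v ∈ K) :
    (K.map (fun s => f s * (L.count s : Int))).sum = (L.map f).sum := by
  induction L with
  | nil => simp
  | cons v L ih =>
    have h1 : ∀ s ∈ K, f s * ((v :: L).count s : Int)
        = f s * (L.count s : Int) + (if s = v then f s else 0) := by
      intro s hs
      rcases eq_or_ne s v with h | h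
      · subst h; simp [List.count_cons]; ring
      · simp [List.count_cons, h, (by simpa [eq_comm] using h : ¬ v = s)]
    rw [List.map_congr_left h1]
    rw [List.sum_map_add]
    rw [ih (fun w hw => hm w (List.mem_cons_of_mem _ hw)),
      pv_sum_indicator f K v hK (hm v (List.mem_cons_self))]
    rw [List.map_cons, List.sum_cons]
    ring

theorem pv_sum_map_add {α : Type} (f g : α → Int) (l : List α) :
    (l.map (fun x => f x + g x)).sum = (l.map f).sum + (l.map g).sum := by
  induction l with
  | nil => simp
  | cons a t ih => simp [ih]; ring

theorem pv_foldl_flatMap {α β γ : Type} (l : List α) (g : α → List β) (step : γ → β → γ)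
    (init : γ) :
    (l.flatMap g).foldl step init = l.foldl (fun d i => (g i).foldl step d) init := by
  induction l generalizing init with
  | nil => rfl
  | cons a t ih => simp [List.flatMap_cons, List.foldl_append, ih]

theorem pv_map_getD_range (l : List Int) :
    (List.range l.length).map (fun i => l.getD i 0) = l := by
  apply List.ext_getElem
  · simp
  · intro i h1 h2
    simp [List.getD_eq_getElem l 0 h2, List.getElem?_eq_getElem h2]

theorem pv_flatMap_congr {α β : Type} (l : List α) (f g : α → List β)
    (h : ∀ a ∈ l, f a = g a) : l.flatMap f = l.flatMap g := by
  induction l with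
  | nil => rfl
  | cons a t ih =>
    simp only [List.flatMap_cons]
    rw [h a (by simp), ih (fun b hb => h b (List.mem_cons_of_mem _ hb))]

theorem pv_range_pairs (xs : List Int) :
    (List.range xs.length).flatMap (fun i => (List.range (xs.length - i - 1)).map
      (fun j => xs.getD i 0 + xs.getD (i + j + 1) 0)) = pvPairs xs := by
  induction xs with
  | nil => rfl
  | cons x t ih =>
    rw [List.length_cons, List.range_succ_eq_map, List.flatMap_cons, List.flatMap_map]
    have hhead : (List.range (t.length + 1 - 0 - 1)).map
        (fun j => (x :: t).getD 0 0 + (x :: t).getD (0 + j + 1) 0)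
        = t.map (fun y => x + y) := by
      have : ∀ j, (x :: t).getD (0 + j + 1) 0 = t.getD j 0 := by
        intro j
        have : 0 + j + 1 = j + 1 := by omega
        rw [this, List.getD_cons_succ]
      conv_rhs => rw [← pv_map_getD_range t]
      rw [List.map_map]
      simp [this]
    have htail : ∀ i : Nat,
        (List.range (t.length + 1 - (Nat.succ i) - 1)).map
          (fun j => (x :: t).getD (Nat.succ i) 0 + (x :: t).getD (Nat.succ i + j + 1) 0)
        = (List.range (t.length - i - 1)).map (fun j => t.getD i 0 + t.getD (i + j + 1) 0) := by
      intro i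
      have h1 : t.length + 1 - Nat.succ i - 1 = t.length - i - 1 := by omega
      rw [h1]
      apply List.map_congr_left
      intro j _
      have h2 : Nat.succ i + j + 1 = (i + j + 1) + 1 := by omega
      simp [h2, List.getD_cons_succ, Nat.succ_eq_add_one]
    rw [hhead]
    have : (List.range t.length).flatMap
          (fun i => (List.range (t.length + 1 - Nat.succ i - 1)).map
            (fun j => (x :: t).getD (Nat.succ i) 0 + (x :: t).getD (Nat.succ i + j + 1) 0))
        = (List.range t.length).flatMap
          (fun i => (List.range (t.length - i - 1)).map
            (fun j => t.getD i 0 + t.getD (i + j + 1) 0)) :=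
      pv_flatMap_congr _ _ _ (fun i _ => htail i)
    rw [this, ih]
    rfl

theorem pv_getD_take (l : List Int) (m i : Nat) (h : i < m) :
    (l.take m).getD i 0 = l.getD i 0 := by
  by_cases hl : i < l.length
  · have h2 : i < (l.take m).length := by simp [List.length_take]; omega
    rw [List.getD_eq_getElem _ 0 h2, List.getD_eq_getElem _ 0 hl]
    exact List.getElem_take
  · rw [List.getD_eq_default (l.take m) 0 (by rw [List.length_take]; omega),
      List.getD_eq_default l 0 (by omega)]

theorem pv_pairs_short (l : List Int) (h : l.length ≤ 1) : pvPairs l = [] := by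
  match l, h with
  | [], _ => rfl
  | [a], _ => simp [pvPairs]

-- A's index-pair list equals the pair sums of `take n`
theorem pv_idxPairs (nums : List Int) (n : Int) (h : 2 ≤ n → n ≤ (nums.length : Int)) :
    (PySem.List.pyRange 0 n 1).flatMap (fun i => (PySem.List.pyRange (i + 1) n 1).map
        (fun j => PySem.List.pyGetD nums i 0 + PySem.List.pyGetD nums j 0))
      = pvPairs (nums.take n.toNat) := by
  by_cases hn : n ≤ 0
  · rw [PySem.List.pyRange_one_eq_nil hn]
    rw [show n.toNat = 0 by omega]
    rfl
  push_neg at hn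
  rcases eq_or_lt_of_le (by omega : (1 : Int) ≤ n) with hn1 | hn2
  · rw [← hn1]
    rw [pv_pairs_short _ (by rw [List.length_take]; omega)]
    rw [(by decide : PySem.List.pyRange 0 1 1 = [0])]
    rw [List.flatMap_cons, List.flatMap_nil, List.append_nil]
    rw [PySem.List.pyRange_one_eq_nil (by omega)]
    rfl
  · -- 2 ≤ n
    have hlen : n ≤ (nums.length : Int) := h (by omega)
    set N := n.toNat with hN
    have hNn : (N : Int) = n := by omega
    have hNlen : N ≤ nums.length := by omega
    set xs := nums.take N with hxs
    have hxslen : xs.length = N := by rw [hxs, List.length_take]; omega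
    have step1 : PySem.List.pyRange 0 n 1 = List.map (fun (k : Nat) => (k : Int)) (List.range N) := by
      rw [PySem.List.pyRange_one]
      have : (n - 0).toNat = N := by omega
      rw [this]
      apply List.map_congr_left
      intro k _
      omega
    rw [step1, List.flatMap_map]
    have step3 : ∀ k ∈ List.range N,
        (PySem.List.pyRange ((k : Int) + 1) n 1).map
          (fun j => PySem.List.pyGetD nums (k : Int) 0 + PySem.List.pyGetD nums j 0)
        = (List.range (N - k - 1)).map (fun j => xs.getD k 0 + xs.getD (k + j + 1) 0) := by
      intro k hk
      have hkN : k < N := List.mem_range.mp hk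
      rw [PySem.List.pyRange_one]
      have : (n - ((k : Int) + 1)).toNat = N - k - 1 := by omega
      rw [this, List.map_map]
      apply List.map_congr_left
      intro j hj
      have hjN : j < N - k - 1 := List.mem_range.mp hj
      simp only [Function.comp_def]
      have e1 : (k : Int) + 1 + (j : Int) = ((k + j + 1 : Nat) : Int) := by push_cast; ring
      rw [e1, PySem.List.pyGetD_natCast, PySem.List.pyGetD_natCast]
      rw [← pv_getD_take nums N k (by omega), ← pv_getD_take nums N (k + j + 1) (by omega)]
    rw [pv_flatMap_congr _ _ _ step3]
    rw [← hxslen]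
    exact pv_range_pairs xs

theorem pv_counter_items_sum (P : List Int) (f : Int → Int) :
    ((PySem.Dict.counter P).items.map (fun pc => f pc.1 * pc.2)).sum = (P.map f).sum := by
  rw [PySem.Dict.items_counter, List.map_map]
  have : ((fun pc : Int × Int => f pc.1 * pc.2) ∘ fun s => (s, (P.count s : Int)))
      = fun s => f s * (P.count s : Int) := rfl
  rw [this]
  exact pv_sum_count f _ P (PySem.Set.nodup_ofList P)
    (fun v hv => (PySem.Set.mem_ofList P v).mpr hv)

theorem pv_A_entries (n k : Int) (nums : List Int) (h : 2 ≤ n → n ≤ (nums.length : Int)) :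
    compute_powers n k nums = (PySem.List.pyRange 1 (k + 1) 1).map
      (fun r => (pvG (nums.take n.toNat) r.toNat) % 998244353) := by
  have hp : (0 : Int) < 998244353 := by norm_num
  unfold compute_powers
  have hdict : (PySem.List.pyRange 0 n 1).foldl (fun d i =>
      (PySem.List.pyRange (i + 1) n 1).foldl (fun d j =>
        d.modify (PySem.List.pyGetD nums i 0 + PySem.List.pyGetD nums j 0) 0 (· + 1)) d)
      PySem.Dict.empty = PySem.Dict.counter (pvPairs (nums.take n.toNat)) := by
    rw [← pv_idxPairs nums n h]
    rw [PySem.Dict.counter_eq_foldl]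
    rw [pv_foldl_flatMap]
    apply PySem.List.foldl_congr_mem
    intro d i _
    rw [List.foldl_map]
  rw [hdict]
  rw [PySem.List.foldl_append_singleton_eq_map]
  rw [List.nil_append]
  apply List.map_congr_left
  intro r _
  have e1 : ∀ pc : Int × Int,
      PySem.Int.powMod pc.1 r.toNat 998244353 * pc.2
        = (pc.1 ^ r.toNat % 998244353) * pc.2 := by
    intro pc
    unfold PySem.Int.powMod
    rw [PySem.Int.mod_eq_emod_of_pos hp]
  rw [pv_foldl_mod₀]
  rw [List.map_congr_left (fun pc _ => e1 pc)]
  rw [pv_counter_items_sum (pvPairs (nums.take n.toNat)) (fun s => s ^ r.toNat % 998244353)]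
  have : ((pvPairs (nums.take n.toNat)).map (fun s => s ^ r.toNat % 998244353)).sum
      ≡ ((pvPairs (nums.take n.toNat)).map (fun s => s ^ r.toNat)).sum [ZMOD 998244353] :=
    pv_sum_modEq _ _ _ _ (fun v _ => Int.emod_emod_of_dvd _ dvd_rfl)
  exact this


theorem pv_pyRange_nat (N : Nat) :
    PySem.List.pyRange 0 (N : Int) 1 = List.map (fun (k : Nat) => (k : Int)) (List.range N) := by
  rw [PySem.List.pyRange_one]
  have : ((N : Int) - 0).toNat = N := by omega
  rw [this]
  apply List.map_congr_left
  intro k _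
  omega

-- pair count inside one value class: C(c, 2) as Python computes it
def pvCF (c : Int) : Int := PySem.Int.floordiv (c * (c - 1)) 2

-- structural form of B's weighted pair-sum list over the distinct values
def pvW (c : Int → Int) : List Int → List (Int × Int)
  | [] => []
  | u :: rest => (if 1 < c u then [(2 * u, pvCF (c u))] else [])
      ++ rest.map (fun v => (u + v, c u * c v)) ++ pvW c rest

-- sum of F over unordered index pairs i < j of a list
def pvPairF (F : Int → Int → Int) : List Int → Int
  | [] => 0
  | x :: t => (t.map (F x)).sum + pvPairF F t

theorem pv_W_congr (c c' : Int → Int) (h : ∀ a, c a = c' a) (l : List Int) :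
    pvW c l = pvW c' l := by
  induction l with
  | nil => rfl
  | cons u rest ih =>
    unfold pvW
    rw [ih, List.map_congr_left (fun v (_ : v ∈ rest) =>
      show (u + v, c u * c v) = (u + v, c' u * c' v) by rw [h u, h v]), h u]

theorem pv_pairs_map_sum (g : Int → Int) (xs : List Int) :
    ((pvPairs xs).map g).sum = pvPairF (fun x y => g (x + y)) xs := by
  induction xs with
  | nil => rfl
  | cons x t ih =>
    unfold pvPairs pvPairF
    rw [List.map_append, List.sum_append, ih, List.map_map]
    rfl

theorem pv_double_F (F : Int → Int → Int) (hsym : ∀ a b, F a b = F b a) (l : List Int) :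
    (l.map (fun x => (l.map (F x)).sum)).sum
      = 2 * pvPairF F l + (l.map (fun x => F x x)).sum := by
  induction l with
  | nil => simp [pvPairF]
  | cons x t ih =>
    have hs : (t.map (fun a => F a x)).sum = (t.map (fun a => F x a)).sum := by
      apply congrArg
      exact List.map_congr_left (fun a _ => hsym a x)
    calc ((x :: t).map (fun a => ((x :: t).map (F a)).sum)).sum
        = (F x x + (t.map (F x)).sum)
          + ((t.map (fun a => F a x)).sum + (t.map (fun a => (t.map (F a)).sum)).sum) := by
          simp [pv_sum_map_add]
      _ = 2 * pvPairF F (x :: t) + ((x :: t).map (fun a => F a a)).sum := by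
          rw [hs, ih]
          simp only [pvPairF, List.map_cons, List.sum_cons]
          ring

theorem pv_CF_double (c : Int) : 2 * pvCF c = c * (c - 1) := by
  unfold pvCF
  rw [PySem.Int.floordiv_eq_ediv_of_pos (by norm_num)]
  have hdvd : (2 : Int) ∣ c * (c - 1) := by
    have h := Int.even_mul_succ_self (c - 1)
    have h2 : (c - 1) * (c - 1 + 1) = c * (c - 1) := by ring
    rw [h2] at h
    exact h.two_dvd
  rw [mul_comm]
  exact Int.ediv_mul_cancel hdvd

theorem pv_wsum_struct (c : Int → Int) (g : Int → Int) (K : List Int) :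
    ((pvW c K).map (fun p => g p.1 * p.2)).sum
      = (K.map (fun u => g (2 * u) * (if 1 < c u then pvCF (c u) else 0))).sum
        + pvPairF (fun u v => g (u + v) * (c u * c v)) K := by
  induction K with
  | nil => rfl
  | cons u rest ih =>
    unfold pvW pvPairF
    rw [List.map_append, List.sum_append, List.map_append, List.sum_append, List.map_map]
    simp only [List.map_cons, List.sum_cons]
    rw [ih]
    have hd : ((if 1 < c u then [(2 * u, pvCF (c u))] else []).map (fun p => g p.1 * p.2)).sum
        = g (2 * u) * (if 1 < c u then pvCF (c u) else 0) := by
      by_cases h : 1 < c u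
      · simp [h]
      · simp [h]
    rw [hd]
    simp only [Function.comp_def]
    ring

theorem pv_diag_sum (c g : Int → Int) (K : List Int) (hpos : ∀ u ∈ K, 1 ≤ c u) :
    2 * ((K.map (fun u => g (2 * u) * (if 1 < c u then pvCF (c u) else 0))).sum)
      = (K.map (fun u => g (u + u) * (c u * c u))).sum
        - (K.map (fun u => g (2 * u) * c u)).sum := by
  induction K with
  | nil => simp
  | cons a t ih =>
    have h1 : 2 * (g (2 * a) * (if 1 < c a then pvCF (c a) else 0))
        = g (a + a) * (c a * c a) - g (2 * a) * c a := by
      rw [show g (a + a) = g (2 * a) by rw [two_mul]]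
      by_cases h : 1 < c a
      · rw [if_pos h, show 2 * (g (2 * a) * pvCF (c a)) = g (2 * a) * (2 * pvCF (c a)) by ring,
          pv_CF_double]
        ring
      · have hc1 : c a = 1 := le_antisymm (by omega) (hpos a List.mem_cons_self)
        rw [if_neg h, hc1]
        ring
    have h2 := ih (fun u hu => hpos u (List.mem_cons_of_mem _ hu))
    simp only [List.map_cons, List.sum_cons]
    linarith [h1, h2]

-- the weighted distinct-value pair list carries exactly the pair-sum multiset
theorem pv_grand (xs : List Int) (g : Int → Int) :
    ((pvW (fun v => (xs.count v : Int)) (PySem.Set.ofList xs)).map (fun p => g p.1 * p.2)).sum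
      = ((pvPairs xs).map g).sum := by
  set c : Int → Int := fun v => (xs.count v : Int) with hc
  set K : List Int := PySem.Set.ofList xs with hKdef
  have hK : K.Nodup := PySem.Set.nodup_ofList xs
  have hmemK : ∀ v ∈ xs, v ∈ K := fun v hv => (PySem.Set.mem_ofList xs v).mpr hv
  have hpos : ∀ u ∈ K, 1 ≤ c u := by
    intro u hu
    have : u ∈ xs := (PySem.Set.mem_ofList xs u).mp hu
    have := List.count_pos_iff.mpr this
    simp only [hc]
    exact_mod_cast this
  apply mul_left_cancel₀ (two_ne_zero (α := Int))
  rw [pv_wsum_struct, pv_pairs_map_sum]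
  -- the doubled diagonal weight is c u * (c u - 1) for every u that occurs
  have hdiag : ∀ u ∈ K, 2 * (g (2 * u) * (if 1 < c u then pvCF (c u) else 0))
      = g (2 * u) * (c u * c u) - g (2 * u) * c u := by
    intro u hu
    by_cases h : 1 < c u
    · rw [if_pos h, show 2 * (g (2 * u) * pvCF (c u)) = g (2 * u) * (2 * pvCF (c u)) by ring,
        pv_CF_double]
      ring
    · have h1 : c u = 1 := le_antisymm (by omega) (hpos u hu)
      rw [if_neg h, h1]
      ring
  -- Σ over xs of any h equals the count-weighted Σ over K
  have hgroup : ∀ h : Int → Int, (K.map (fun u => h u * c u)).sum = (xs.map h).sum := by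
    intro h
    exact pv_sum_count h K xs hK hmemK
  -- double sums over values and over elements
  have hFsym : ∀ a b : Int, g (a + b) * (c a * c b) = g (b + a) * (c b * c a) := by
    intro a b
    rw [add_comm a b]
    ring
  have hdd : (K.map (fun u => (K.map (fun v => g (u + v) * (c u * c v))).sum)).sum
      = 2 * pvPairF (fun u v => g (u + v) * (c u * c v)) K
        + (K.map (fun u => g (u + u) * (c u * c u))).sum :=
    pv_double_F _ hFsym K
  have hxy : (K.map (fun u => (K.map (fun v => g (u + v) * (c u * c v))).sum)).sum
      = (xs.map (fun x => (xs.map (fun y => g (x + y))).sum)).sum := by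
    have hrow : ∀ u : Int, (K.map (fun v => g (u + v) * (c u * c v))).sum
        = (xs.map (fun y => g (u + y))).sum * c u := by
      intro u
      have : (K.map (fun v => g (u + v) * (c u * c v))).sum
          = (K.map (fun v => (g (u + v) * c v) * c u)).sum := by
        apply congrArg
        apply List.map_congr_left
        intro v _
        ring
      rw [this]
      have h2 : (K.map (fun v => (g (u + v) * c v) * c u)).sum
          = (K.map (fun v => g (u + v) * c v)).sum * c u := by
        rw [← List.sum_map_mul_right]
      rw [h2]
      have h3 : (K.map (fun v => g (u + v) * c v)).sum = (xs.map (fun y => g (u + y))).sum :=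
        pv_sum_count (fun y => g (u + y)) K xs hK hmemK
      rw [h3]
    rw [List.map_congr_left (fun u (_ : u ∈ K) => hrow u)]
    exact hgroup (fun x => (xs.map (fun y => g (x + y))).sum)
  have hdd2 : (xs.map (fun x => (xs.map (fun y => g (x + y))).sum)).sum
      = 2 * pvPairF (fun x y => g (x + y)) xs + (xs.map (fun x => g (x + x))).sum :=
    pv_double_F _ (fun a b => by rw [add_comm a b]) xs
  have hdiag2 : (K.map (fun u => g (2 * u) * c u)).sum = (xs.map (fun x => g (2 * x))).sum :=
    hgroup (fun u => g (2 * u))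
  -- assemble
  have hsum2 := pv_diag_sum c g K hpos
  have e1 : (xs.map (fun x => g (x + x))).sum = (xs.map (fun x => g (2 * x))).sum := by
    apply congrArg
    apply List.map_congr_left
    intro x _
    rw [two_mul]
  linarith [hsum2, hdd, hxy, hdd2, hdiag2, e1]

-- value of an accumulate-by-insert fold over a weights list
theorem pv_getD_insfold (W : List (Int × Int)) (d : PySem.Dict Int Int) (s : Int) :
    (W.foldl (fun d p => d.insert p.1 (d.getD p.1 0 + p.2)) d).getD s 0
      = d.getD s 0 + ((W.filter (fun p => p.1 == s)).map (fun p => p.2)).sum := by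
  induction W generalizing d with
  | nil => simp
  | cons p W ih =>
    simp only [List.foldl_cons, List.filter_cons]
    rw [ih]
    by_cases h : p.1 = s
    · simp [PySem.Dict.getD_insert, h]
      ring
    · simp [PySem.Dict.getD_insert, h, Ne.symm h]

theorem pv_weighted_sum (g : Int → Int) (K : List Int) (W : List (Int × Int))
    (hK : K.Nodup) (hm : ∀ p ∈ W, p.1 ∈ K) :
    (K.map (fun s => g s * ((W.filter (fun p => p.1 == s)).map (fun p => p.2)).sum)).sum
      = (W.map (fun p => g p.1 * p.2)).sum := by
  induction W with
  | nil => simp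
  | cons p W ih =>
    have h1 : ∀ s ∈ K, g s * (((p :: W).filter (fun q => q.1 == s)).map (fun q => q.2)).sum
        = g s * ((W.filter (fun q => q.1 == s)).map (fun q => q.2)).sum
          + (if s = p.1 then g s * p.2 else 0) := by
      intro s hs
      rw [List.filter_cons]
      by_cases h : p.1 = s
      · rw [if_pos (by simp [h]), if_pos h.symm]
        simp only [List.map_cons, List.sum_cons]
        ring
      · rw [if_neg (by simp [h]), if_neg (fun e => h e.symm)]
        ring
    rw [List.map_congr_left h1, List.sum_map_add]
    rw [ih (fun q hq => hm q (List.mem_cons_of_mem _ hq))]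
    rw [pv_sum_indicator (fun s => g s * p.2) K p.1 hK (hm p List.mem_cons_self)]
    simp only [List.map_cons, List.sum_cons]
    ring

-- B's index loop over distinct values produces exactly the structural weight list
theorem pv_range_W (c : Int → Int) (K : List Int) :
    (List.range K.length).flatMap (fun i =>
      (if 1 < c (K.getD i 0) then [(2 * K.getD i 0, pvCF (c (K.getD i 0)))] else [])
        ++ (K.drop (i + 1)).map (fun v => (K.getD i 0 + v, c (K.getD i 0) * c v)))
    = pvW c K := by
  induction K with
  | nil => rfl
  | cons u rest ih =>
    rw [List.length_cons, List.range_succ_eq_map, List.flatMap_cons, List.flatMap_map]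
    have hhead : (if 1 < c ((u :: rest).getD 0 0) then
          [(2 * (u :: rest).getD 0 0, pvCF (c ((u :: rest).getD 0 0)))] else [])
        ++ ((u :: rest).drop (0 + 1)).map
          (fun v => ((u :: rest).getD 0 0 + v, c ((u :: rest).getD 0 0) * c v))
        = (if 1 < c u then [(2 * u, pvCF (c u))] else []) ++ rest.map (fun v => (u + v, c u * c v)) := by
      rfl
    have htail : ∀ i ∈ List.range rest.length,
        ((if 1 < c ((u :: rest).getD (Nat.succ i) 0) then
            [(2 * (u :: rest).getD (Nat.succ i) 0, pvCF (c ((u :: rest).getD (Nat.succ i) 0)))] else [])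
          ++ ((u :: rest).drop (Nat.succ i + 1)).map
            (fun v => ((u :: rest).getD (Nat.succ i) 0 + v, c ((u :: rest).getD (Nat.succ i) 0) * c v)))
        = ((if 1 < c (rest.getD i 0) then [(2 * rest.getD i 0, pvCF (c (rest.getD i 0)))] else [])
          ++ (rest.drop (i + 1)).map (fun v => (rest.getD i 0 + v, c (rest.getD i 0) * c v))) := by
      intro i _
      rfl
    rw [hhead, pv_flatMap_congr _ _ _ htail, ih]
    rfl

theorem pv_zip_map_self {α β : Type} (f : α → β) (l : List α) :
    (l.map f).zip l = l.map (fun x => (f x, x)) := by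
  induction l with
  | nil => rfl
  | cons a t ih => simp [ih]

theorem pv_zip_map_map {α β γ : Type} (f : α → β) (h : α → γ) (l : List α) :
    (l.map f).zip (l.map h) = l.map (fun x => (f x, h x)) := by
  induction l with
  | nil => rfl
  | cons a t ih => simp [ih]

-- incremental power update step
theorem pv_pow_mod_step (x : Int) (m : Nat) :
    x ^ m % 998244353 * x % 998244353 = x ^ (m + 1) % 998244353 := by
  rw [Int.mul_emod, Int.emod_emod_of_dvd _ dvd_rfl, ← Int.mul_emod, pow_succ]

-- closed form of B's power/output loop
theorem pv_pow_fold (sv cv : List Int) (m : Nat) :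
    (PySem.List.pyRange 0 (m : Int) 1).foldl
      (fun (st : List Int × List Int) _ =>
        ((st.1.zip sv).map (fun ps => ps.1 * ps.2 % 998244353),
         st.2 ++ [(((st.1.zip sv).map (fun ps => ps.1 * ps.2 % 998244353)).zip cv).foldl
            (fun t q => t + q.1 * q.2) 0 % 998244353]))
      (List.replicate sv.length 1, [])
    = (sv.map (fun s => s ^ m % 998244353),
       (List.range m).map (fun j =>
         (((sv.map (fun s => s ^ (j + 1) % 998244353)).zip cv).foldl
            (fun t q => t + q.1 * q.2) 0) % 998244353)) := by
  induction m with
  | zero =>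
    rw [PySem.List.pyRange_one_eq_nil (by norm_num)]
    have : sv.map (fun s => s ^ 0 % 998244353) = List.replicate sv.length 1 := by
      rw [show (fun s : Int => s ^ 0 % 998244353) = (fun _ : Int => (1 : Int)) by
        funext s; rw [pow_zero]; norm_num]
      exact List.map_const'
    rw [this]
    rfl
  | succ m ih =>
    have hcast : ((m + 1 : Nat) : Int) = ((m : Int) + 1) := by push_cast; ring
    rw [hcast, PySem.List.pyRange_one_succ_right (by omega), List.foldl_append, ih]
    simp only [List.foldl_cons, List.foldl_nil]
    have hzip : ((sv.map (fun s => s ^ m % 998244353)).zip sv).map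
        (fun ps => ps.1 * ps.2 % 998244353) = sv.map (fun s => s ^ (m + 1) % 998244353) := by
      rw [pv_zip_map_self, List.map_map]
      apply List.map_congr_left
      intro s _
      exact pv_pow_mod_step s m
    rw [hzip, List.range_succ, List.map_append]
    rfl

-- B's nested dict-building loop is the flat accumulate-fold over the weight list
theorem pv_build_eq (cnt : PySem.Dict Int Int) (vals : List Int) :
    (PySem.List.pyRange 0 (vals.length : Int) 1).foldl (fun d i =>
      (PySem.List.slice vals (some (i + 1)) none).foldl
        (fun d v => d.insert (PySem.List.pyGetD vals i 0 + v)
          (d.getD (PySem.List.pyGetD vals i 0 + v) 0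
            + cnt.getD (PySem.List.pyGetD vals i 0) 0 * cnt.getD v 0))
        (if 1 < cnt.getD (PySem.List.pyGetD vals i 0) 0 then
          d.insert (2 * PySem.List.pyGetD vals i 0)
            (d.getD (2 * PySem.List.pyGetD vals i 0) 0
              + PySem.Int.floordiv (cnt.getD (PySem.List.pyGetD vals i 0) 0
                  * (cnt.getD (PySem.List.pyGetD vals i 0) 0 - 1)) 2)
         else d))
      PySem.Dict.empty
    = (pvW (fun u => cnt.getD u 0) vals).foldl
        (fun d p => d.insert p.1 (d.getD p.1 0 + p.2)) PySem.Dict.empty := by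
  rw [← pv_range_W (fun u => cnt.getD u 0) vals, pv_foldl_flatMap]
  rw [pv_pyRange_nat vals.length, List.foldl_map]
  apply PySem.List.foldl_congr_mem
  intro d i hi
  have hiN : i < vals.length := List.mem_range.mp hi
  have hslice : PySem.List.slice vals (some ((i : Int) + 1)) none = vals.drop (i + 1) := by
    rw [PySem.List.slice_from vals (by omega : (0 : Int) ≤ (i : Int) + 1),
      show ((i : Int) + 1).toNat = i + 1 by omega]
  rw [PySem.List.pyGetD_natCast, hslice, List.foldl_append, List.foldl_map]
  have hinit : (if 1 < cnt.getD (vals.getD i 0) 0 then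
        d.insert (2 * vals.getD i 0)
          (d.getD (2 * vals.getD i 0) 0
            + PySem.Int.floordiv (cnt.getD (vals.getD i 0) 0
                * (cnt.getD (vals.getD i 0) 0 - 1)) 2)
       else d)
      = (if 1 < cnt.getD (vals.getD i 0) 0 then
          [(2 * vals.getD i 0, pvCF (cnt.getD (vals.getD i 0) 0))] else []).foldl
        (fun d p => d.insert p.1 (d.getD p.1 0 + p.2)) d := by
    by_cases h : 1 < cnt.getD (vals.getD i 0) 0
    · rw [if_pos h, if_pos h]
      simp [pvCF]
    · rw [if_neg h, if_neg h]
      rfl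
  rw [hinit]

theorem pv_B_out (n k : Int) (nums : List Int) :
    compute_powers_alt n k nums
      = (List.range (max k 0).toNat).map
          (fun j => pvG (nums.take n.toNat) (j + 1) % 998244353) := by
  unfold compute_powers_alt
  dsimp only
  have hxs : (if 0 < n then PySem.List.slice nums none (some n) else []) = nums.take n.toNat := by
    split_ifs with h
    · exact PySem.List.slice_to nums (by omega)
    · rw [show n.toNat = 0 by omega]
      rfl
  rw [hxs]
  set xs : List Int := nums.take n.toNat with hxsdef
  rw [PySem.Dict.foldl_insert_getD_add_one_eq_counter, PySem.Dict.keys_counter]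
  rw [pv_build_eq (PySem.Dict.counter xs) (PySem.Set.ofList xs)]
  rw [pv_W_congr (fun u => (PySem.Dict.counter xs).getD u 0) (fun v => (xs.count v : Int))
    (fun a => PySem.Dict.getD_counter xs a) (PySem.Set.ofList xs)]
  set W0 : List (Int × Int) := pvW (fun v => (xs.count v : Int)) (PySem.Set.ofList xs) with hW0
  set pc : PySem.Dict Int Int :=
    W0.foldl (fun d p => d.insert p.1 (d.getD p.1 0 + p.2)) PySem.Dict.empty with hpc
  have hkeys : pc.keys = PySem.Set.ofList (W0.map (fun p => p.1)) := by
    rw [hpc, PySem.Dict.keys_foldl_insert_key W0 (fun p => p.1)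
      (fun d p => d.getD p.1 0 + p.2) PySem.Dict.empty]
    rfl
  have hgetD : ∀ s : Int, pc.getD s 0
      = ((W0.filter (fun p => p.1 == s)).map (fun p => p.2)).sum := by
    intro s
    rw [hpc, pv_getD_insfold]
    simp
  rw [hkeys]
  set K : List Int := PySem.Set.ofList (W0.map (fun p => p.1)) with hKdef
  rw [List.map_congr_left (fun s (_ : s ∈ K) => hgetD s)]
  have hMk : max k 0 = (((max k 0).toNat : Nat) : Int) := by omega
  rw [hMk, pv_pow_fold]
  apply List.map_congr_left
  intro j _
  rw [pv_zip_map_map, List.foldl_map, PySem.List.foldl_add]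
  rw [zero_add]
  have hmod : (K.map (fun s => s ^ (j + 1) % 998244353
        * ((W0.filter (fun p => p.1 == s)).map (fun p => p.2)).sum)).sum
      ≡ (K.map (fun s => s ^ (j + 1)
        * ((W0.filter (fun p => p.1 == s)).map (fun p => p.2)).sum)).sum [ZMOD 998244353] :=
    pv_sum_modEq _ _ _ _ (fun s _ => Int.ModEq.mul_right _ (Int.emod_emod_of_dvd _ dvd_rfl))
  have hwt : (K.map (fun s => s ^ (j + 1)
        * ((W0.filter (fun p => p.1 == s)).map (fun p => p.2)).sum)).sum
      = (W0.map (fun p => p.1 ^ (j + 1) * p.2)).sum :=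
    pv_weighted_sum (fun s => s ^ (j + 1)) K W0 (PySem.Set.nodup_ofList _)
      (fun p hp => (PySem.Set.mem_ofList _ _).mpr (List.mem_map_of_mem hp))
  have hgr : (W0.map (fun p => p.1 ^ (j + 1) * p.2)).sum
      = ((pvPairs xs).map (fun v => v ^ (j + 1))).sum :=
    pv_grand xs (fun v => v ^ (j + 1))
  have : (K.map (fun s => s ^ (j + 1) % 998244353
        * ((W0.filter (fun p => p.1 == s)).map (fun p => p.2)).sum)).sum
      ≡ pvG xs (j + 1) [ZMOD 998244353] := by
    rw [pvG]
    exact hmod.trans (by rw [hwt, hgr])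
  exact this

-- ===== VERDICT (by name: the statement is the Claim_ definition above) =====
theorem compute_powers_spec : Claim_equal_compute_powers := by
  intro n k nums _ hpre
  unfold Spec_compute_powers
  rw [pv_A_entries n k nums hpre, pv_B_out n k nums]
  rw [PySem.List.pyRange_one]
  rw [show (k + 1 - 1).toNat = (max k 0).toNat by omega]
  rw [List.map_map]
  apply List.map_congr_left
  intro j _
  simp only [Function.comp_def]
  rw [show ((1 : Int) + (j : Int)).toNat = j + 1 by omega]
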